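-- pv_equiv track=rewrite | github.com/enderquestral/REEDCSCI121 | Week3/poly2max.py | poly2max
-- ===== SOURCE A (Python) =====
-- def poly2max(x1, x2, y1, y2):
--     # USING : z = -x**4 + 3*x**2 = y**4 + 5*y**2
--     firstRound = True
--     currentmax = 0
--     placeholder = 0
--     for i in range(x1, x2 +1):
--         for v in range(y1, y2 +1):
--             placeholder = -i**4 + 3*i**2 - v**4 + 5*v**2
--             if firstRound:
--                 currentmax = placeholder
--                 firstRound =False
--             if placeholder > currentmax:
--                 currentmax = placeholder
--     #Minimum and maximum values for x and y.
--     #Should return the maximum value z takes for any x and y chosen from those ranges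
--     # EX: poly2max(0,5,3,7)  would search thru values of x from 0 to 5 (including both 0 and 5) using values of y from 3 to 7 to find this polynomial function's largest value
--     # poly2max(0,5,0,10) >>> 6
--     return currentmax
-- ===== SOURCE B (Python) =====
-- def poly2max(x1, x2, y1, y2):
--     # f(x,y) = (-x**4 + 3*x**2) + (5*y**2 - y**4) is additively separable,
--     # so maximise each 1D part independently and add the two maxima.
--     if x1 > x2 or y1 > y2:
--         return 0  # empty rectangle: nothing to maximise (A's loop never runs)
--     best_x = max(-i**4 + 3*i**2 for i in range(x1, x2 + 1))
--     best_y = max(5*v**2 - v**4 for v in range(y1, y2 + 1))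
--     return best_x + best_y
-- ===== Notes on version B (the rewrite author's own statement) =====
-- stated objective: alternative
-- what changed: Exploits that the polynomial is additively separable: B computes the 1D maximum over x and the 1D maximum over y independently and adds them (0 for an empty rectangle), replacing A's nested scan over the whole rectangle; intended as O(n+m) vs O(n*m) but a timing run could not confirm a speed-up on its generated inputs.
import Mathlib
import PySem

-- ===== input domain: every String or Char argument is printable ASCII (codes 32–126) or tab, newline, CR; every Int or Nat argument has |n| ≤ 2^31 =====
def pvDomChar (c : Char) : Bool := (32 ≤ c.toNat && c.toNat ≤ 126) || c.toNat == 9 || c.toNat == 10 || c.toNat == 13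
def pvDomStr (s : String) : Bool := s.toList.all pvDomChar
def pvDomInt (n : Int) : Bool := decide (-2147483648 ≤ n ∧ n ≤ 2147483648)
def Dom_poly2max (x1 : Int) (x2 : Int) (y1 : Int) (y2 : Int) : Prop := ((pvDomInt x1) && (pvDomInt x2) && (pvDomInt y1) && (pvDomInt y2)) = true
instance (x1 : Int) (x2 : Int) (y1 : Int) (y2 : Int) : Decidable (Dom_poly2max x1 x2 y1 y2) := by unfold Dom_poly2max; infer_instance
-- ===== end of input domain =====

-- B replaces A's nested scan of the rectangle by two independent 1D maxima (the
-- polynomial is additively separable) and adds them; an empty rectangle yields 0.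


-- ===== PORT A =====
-- one iteration of A's inner loop body, state = (firstRound, currentmax)
def poly2maxStep (i : Int) (st : Bool × Int) (v : Int) : Bool × Int :=
  let p := -i^4 + 3*i^2 - v^4 + 5*v^2
  let st1 := if st.1 then (false, p) else st
  if p > st1.2 then (st1.1, p) else st1

def poly2max (x1 : Int) (x2 : Int) (y1 : Int) (y2 : Int) : Int :=
  ((PySem.List.pyRange x1 (x2+1) 1).foldl
    (fun st i => (PySem.List.pyRange y1 (y2+1) 1).foldl (poly2maxStep i) st)
    (true, 0)).2

-- ===== PORT B =====
def poly2max_alt (x1 : Int) (x2 : Int) (y1 : Int) (y2 : Int) : Int :=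
  if x1 > x2 ∨ y1 > y2 then 0   -- empty rectangle
  else
    let bestX := PySem.List.max? ((PySem.List.pyRange x1 (x2+1) 1).map (fun i => -i^4 + 3*i^2)) (fun z => z)
    let bestY := PySem.List.max? ((PySem.List.pyRange y1 (y2+1) 1).map (fun v => 5*v^2 - v^4)) (fun z => z)
    bestX.getD 0 + bestY.getD 0   -- getD never fires: both ranges are nonempty in this branch

-- ===== PRECONDITION & SPEC =====
def Spec_poly2max (x1 : Int) (x2 : Int) (y1 : Int) (y2 : Int) (out : Int) : Prop := out = poly2max_alt x1 x2 y1 y2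
instance (x1 : Int) (x2 : Int) (y1 : Int) (y2 : Int) (out : Int) : Decidable (Spec_poly2max x1 x2 y1 y2 out) := by unfold Spec_poly2max; infer_instance

-- ===== CLAIM (what is proved, stated in full; the proofs are below) =====
def Claim_equal_poly2max : Prop := ∀ (x1 : Int) (x2 : Int) (y1 : Int) (y2 : Int), Dom_poly2max x1 x2 y1 y2 → Spec_poly2max x1 x2 y1 y2 (poly2max x1 x2 y1 y2)

-- ===== LEMMAS AND PROOFS =====

-- p in A's loop body equals fX i + gY v
def fX (i : Int) : Int := -i^4 + 3*i^2
def gY (v : Int) : Int := 5*v^2 - v^4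

theorem step_eq (i : Int) (st : Bool × Int) (v : Int) :
    poly2maxStep i st v =
      (if st.1 then (false, fX i + gY v)
       else (false, max st.2 (fX i + gY v))) := by
  rcases st with ⟨b, c⟩
  have hp : -i^4 + 3*i^2 - v^4 + 5*v^2 = fX i + gY v := by unfold fX gY; ring
  cases b
  · simp only [poly2maxStep, hp]
    simp only [Bool.false_eq_true, if_false]
    split_ifs with h <;> simp <;> omega
  · simp [poly2maxStep, hp]

-- inner loop from a non-first state folds max of the combined values
theorem inner_false (i : Int) (M : List Int) (c : Int) :
    M.foldl (poly2maxStep i) (false, c) =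
      (false, M.foldl (fun a v => max a (fX i + gY v)) c) := by
  induction M generalizing c with
  | nil => rfl
  | cons m M ih => simp [List.foldl_cons, step_eq, ih]

theorem inner_true (i : Int) (m : Int) (M : List Int) :
    (m :: M).foldl (poly2maxStep i) (true, 0) =
      (false, M.foldl (fun a v => max a (fX i + gY v)) (fX i + gY m)) := by
  have h : poly2maxStep i (true, 0) m = (false, fX i + gY m) := by simp [step_eq]
  simp [List.foldl_cons, h, inner_false]

-- pull the initial value out of a running max
theorem foldl_max_init (h : Int → Int) (l : List Int) (c a : Int) :
    l.foldl (fun acc v => max acc (h v)) (max c a) =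
      max c (l.foldl (fun acc v => max acc (h v)) a) := by
  induction l generalizing a with
  | nil => rfl
  | cons x l ih => simp [List.foldl_cons, max_assoc, ih]

-- adding a constant on the left commutes with a running max
theorem foldl_max_addl (h : Int → Int) (l : List Int) (c a : Int) :
    l.foldl (fun acc v => max acc (c + h v)) (c + a) =
      c + l.foldl (fun acc v => max acc (h v)) a := by
  induction l generalizing a with
  | nil => rfl
  | cons x l ih =>
    simp only [List.foldl_cons]
    rw [max_add_add_left]
    exact ih _

-- adding a constant on the right commutes with a running max
theorem foldl_max_addr (h : Int → Int) (l : List Int) (c a : Int) :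
    l.foldl (fun acc v => max acc (h v + c)) (a + c) =
      l.foldl (fun acc v => max acc (h v)) a + c := by
  induction l generalizing a with
  | nil => rfl
  | cons x l ih =>
    simp only [List.foldl_cons]
    rw [max_add_add_right]
    exact ih _

-- a whole row i of the rectangle: fX i + (max of gY over the y-range m :: M)
theorem inner_row (i m : Int) (M : List Int) :
    M.foldl (fun a v => max a (fX i + gY v)) (fX i + gY m) =
      fX i + M.foldl (fun a v => max a (gY v)) (gY m) := by
  exact foldl_max_addl gY M (fX i) (gY m)

-- one outer step from a non-first state
theorem outer_step (i c m : Int) (M : List Int) :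
    (m :: M).foldl (poly2maxStep i) (false, c) =
      (false, max c (fX i + M.foldl (fun a v => max a (gY v)) (gY m))) := by
  rw [inner_false]
  congr 1
  have h1 : (m :: M).foldl (fun a v => max a (fX i + gY v)) c
      = M.foldl (fun a v => max a (fX i + gY v)) (max c (fX i + gY m)) := rfl
  rw [h1, foldl_max_init, inner_row]

-- outer loop once past the first row, with the y-range fixed as m :: M
theorem outer_false (m : Int) (M L : List Int) (c : Int) :
    L.foldl (fun st i => (m :: M).foldl (poly2maxStep i) st) (false, c) =
      (false, L.foldl
        (fun a i => max a (fX i + M.foldl (fun a v => max a (gY v)) (gY m))) c) := by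
  induction L generalizing c with
  | nil => rfl
  | cons x L ih =>
    have h1 : List.foldl (fun st i => (m :: M).foldl (poly2maxStep i) st) (false, c) (x :: L)
        = List.foldl (fun st i => (m :: M).foldl (poly2maxStep i) st)
            ((m :: M).foldl (poly2maxStep x) (false, c)) L := rfl
    rw [h1, outer_step, ih]
    rfl

-- the whole nested loop on cons-shaped ranges
theorem outer_eval (x m : Int) (L M : List Int) :
    ((x :: L).foldl (fun st i => ((m :: M).foldl (poly2maxStep i) st)) (true, 0)).2 =
      L.foldl (fun a i => max a (fX i)) (fX x) +
        M.foldl (fun a v => max a (gY v)) (gY m) := by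
  have h1 : (x :: L).foldl (fun st i => ((m :: M).foldl (poly2maxStep i) st)) (true, 0)
      = L.foldl (fun st i => ((m :: M).foldl (poly2maxStep i) st))
          ((m :: M).foldl (poly2maxStep x) (true, 0)) := rfl
  rw [h1, inner_true, inner_row, outer_false]
  exact foldl_max_addr fX L (M.foldl (fun a v => max a (gY v)) (gY m)) (fX x)

-- ===== VERDICT (by name: the statement is the Claim_ definition above) =====
-- a fold that ignores its elements keeps its initial state (empty inner range)
theorem foldl_keep {α β : Type} (L : List β) (s : α) :
    L.foldl (fun st _ => st) s = s := by
  induction L generalizing s with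
  | nil => rfl
  | cons _ L ih => exact ih s

theorem poly2max_spec : Claim_equal_poly2max := by
  intro x1 x2 y1 y2 _
  unfold Spec_poly2max poly2max poly2max_alt
  by_cases hx : x1 ≤ x2
  · by_cases hy : y1 ≤ y2
    · -- both ranges nonempty: the separable closed computation
      rw [if_neg (by omega)]
      rw [PySem.List.pyRange_one_cons (by omega : x1 < x2 + 1),
          PySem.List.pyRange_one_cons (by omega : y1 < y2 + 1)]
      rw [outer_eval]
      simp only [List.map_cons, PySem.List.max?_id_cons, Option.getD_some, List.foldl_map]
      rfl
    · -- empty y-range: every outer step is the identity, A keeps (true, 0)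
      rw [if_pos (Or.inr (by omega))]
      rw [PySem.List.pyRange_one_eq_nil (by omega : y2 + 1 ≤ y1)]
      simp only [List.foldl_nil, foldl_keep]
  · -- empty x-range: A's outer loop never runs
    rw [if_pos (Or.inl (by omega))]
    rw [PySem.List.pyRange_one_eq_nil (by omega : x2 + 1 ≤ x1)]
    rfl
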